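-- pv_equiv track=rewrite | github.com/dandumitriu33/CodeWarsPython | set1/validparantheses.py | first_para
-- ===== SOURCE A (Python) =====
-- def first_para(string):
--     i = 0
--     first_para = ''
--     while i < len(string):
--         if string[i] == '(' or string[i] == ')':
--             first_para = string[i]
--             break
--         else:
--             i += 1
--             continue
--     if first_para == ')':
--         return False
--     elif first_para == '':
--         return True
--     else:
--         return True
-- ===== SOURCE B (Python) =====
-- def first_para(string):
--     o = string.find('(')
--     c = string.find(')')
--     return not (c != -1 and (o == -1 or c < o))
-- ===== Notes on version B (the rewrite author's own statement) =====
-- stated objective: idiomatic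
-- what changed: Replaces the manual index-and-break while loop with two str.find calls and a single sentinel/index comparison deciding which parenthesis comes first.
import Mathlib
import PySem

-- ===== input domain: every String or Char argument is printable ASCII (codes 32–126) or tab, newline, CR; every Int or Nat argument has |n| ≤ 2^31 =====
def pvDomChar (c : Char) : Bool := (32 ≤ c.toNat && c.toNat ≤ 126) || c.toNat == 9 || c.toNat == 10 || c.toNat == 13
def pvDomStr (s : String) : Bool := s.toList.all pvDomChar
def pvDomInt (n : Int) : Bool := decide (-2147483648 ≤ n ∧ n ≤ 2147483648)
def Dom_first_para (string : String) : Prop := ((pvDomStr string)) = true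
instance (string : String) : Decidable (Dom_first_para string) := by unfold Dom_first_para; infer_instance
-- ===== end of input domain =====

-- B replaces A's manual index-and-break scan with two str.find calls and one index comparison (idiomatic; return value only).

-- ===== PORT A =====
-- A's while loop: scan for the first character that is '(' or ')' (none if the loop runs off the end).
def firstParaLoop : List Char → Option Char
  | [] => none
  | c :: t => if c = '(' || c = ')' then some c else firstParaLoop t

def first_para (string : String) : Bool :=
  let fp := firstParaLoop string.toList
  if fp = some ')' then false
  else if fp = none then true
  else true

-- ===== PORT B =====
def first_para_alt (string : String) : Bool :=
  let o := PySem.Str.find string "("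
  let c := PySem.Str.find string ")"
  !(decide (c ≠ -1) && (decide (o = -1) || decide (c < o)))

-- ===== PRECONDITION & SPEC =====
def Spec_first_para (string : String) (out : Bool) : Prop := out = first_para_alt string
instance (string : String) (out : Bool) : Decidable (Spec_first_para string out) := by unfold Spec_first_para; infer_instance

-- ===== CLAIM (what is proved, stated in full; the proofs are below) =====
def Claim_equal_first_para : Prop := ∀ (string : String), Dom_first_para string → Spec_first_para string (first_para string)

-- ===== LEMMAS AND PROOFS =====

theorem pv_go_nil (sub : List Char) (k : Nat) :
    PySem.Chars.find.go sub [] k = if sub.isEmpty then (k : Int) else -1 := by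
  simp [PySem.Chars.find.go]

theorem pv_go_cons (sub : List Char) (c : Char) (t : List Char) (k : Nat) :
    PySem.Chars.find.go sub (c :: t) k =
      if sub.isPrefixOf (c :: t) then (k : Int) else PySem.Chars.find.go sub t (k + 1) := by
  simp [PySem.Chars.find.go]

theorem pv_go_bound (sub : List Char) : ∀ (t : List Char) (k : Nat),
    PySem.Chars.find.go sub t k = -1 ∨ (k : Int) ≤ PySem.Chars.find.go sub t k := by
  intro t
  induction t with
  | nil =>
    intro k; rw [pv_go_nil]; split_ifs <;> simp
  | cons c t ih =>
    intro k; rw [pv_go_cons]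
    split_ifs with h
    · right; exact le_refl _
    · rcases ih (k + 1) with h1 | h1
      · left; exact h1
      · right; omega

theorem pv_main : ∀ (t : List Char) (k : Nat),
    (!(decide (PySem.Chars.find.go [')'] t k ≠ -1) &&
       (decide (PySem.Chars.find.go ['('] t k = -1) ||
        decide (PySem.Chars.find.go [')'] t k < PySem.Chars.find.go ['('] t k)))) =
    (if firstParaLoop t = some ')' then false
     else if firstParaLoop t = none then true else true) := by
  intro t
  induction t with
  | nil =>
    intro k
    simp [firstParaLoop, pv_go_nil, List.isEmpty]
  | cons c t ih =>
    intro k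
    rw [pv_go_cons, pv_go_cons]
    by_cases ho : c = '('
    · subst ho
      have hb := pv_go_bound [')'] t (k + 1)
      simp only [firstParaLoop, List.isPrefixOf]
      norm_num
      rcases hb with h1 | h1 <;> simp_all
      omega
    · by_cases hc : c = ')'
      · subst hc
        have hb := pv_go_bound ['('] t (k + 1)
        simp only [firstParaLoop, List.isPrefixOf]
        norm_num
        rcases hb with h1 | h1 <;> simp_all
      · have h1 : ((')' == c) && true) = false := by
          simp only [Bool.and_true, beq_eq_false_iff_ne, ne_eq]
          exact fun h => hc h.symm
        have h2 : (('(' == c) && true) = false := by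
          simp only [Bool.and_true, beq_eq_false_iff_ne, ne_eq]
          exact fun h => ho h.symm
        simp only [firstParaLoop, List.isPrefixOf, h1, h2, ho, hc, decide_false,
          Bool.or_self, Bool.false_eq_true, if_false]
        exact ih (k + 1)

-- ===== VERDICT (by name: the statement is the Claim_ definition above) =====
theorem first_para_spec : Claim_equal_first_para := by
  intro s _
  unfold Spec_first_para first_para first_para_alt
  simp only [PySem.Str.find_eq, PySem.Chars.find]
  exact (pv_main s.toList 0).symm
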